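-- pv_equiv track=rewrite | github.com/kvikster/l-screening | server/python-version/logic.py | _classify_from_filename
-- ===== SOURCE A (Python) =====
-- def _classify_from_filename(filename: str) -> str:
--     f = str(filename).lower()
--     if "blank" in f:
--         return "blank"
--     for i in range(1, 10):
--         if f.startswith(f"{i}_") or f.startswith(f"{i}_neg"):
--             return f"sample_{i}"
--     return "unknown"
-- ===== SOURCE B (Python) =====
-- def _classify_from_filename(filename: str) -> str:
--     f = str(filename).lower()
--     if "blank" in f:
--         return "blank"
--     if len(f) >= 2 and "1" <= f[0] <= "9" and f[1] == "_":
--         return "sample_" + f[0]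
--     return "unknown"
-- ===== Notes on version B (the rewrite author's own statement) =====
-- stated objective: simpler
-- what changed: Replaced the 9-iteration prefix-scan loop (with its redundant neg-variant check) by a single closed-form test on the first two characters of the lowercased name.
import Mathlib
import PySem

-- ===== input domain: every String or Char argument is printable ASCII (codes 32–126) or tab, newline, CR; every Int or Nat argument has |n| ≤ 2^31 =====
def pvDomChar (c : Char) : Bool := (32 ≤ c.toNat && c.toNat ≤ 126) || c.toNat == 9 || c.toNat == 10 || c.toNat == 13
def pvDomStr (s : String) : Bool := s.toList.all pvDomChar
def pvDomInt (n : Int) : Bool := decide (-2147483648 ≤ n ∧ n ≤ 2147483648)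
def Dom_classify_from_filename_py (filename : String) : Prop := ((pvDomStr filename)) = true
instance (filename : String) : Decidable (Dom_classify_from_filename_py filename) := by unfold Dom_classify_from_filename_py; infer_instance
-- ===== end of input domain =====

-- B replaces A's 9-iteration startswith loop by one closed-form test on the first two characters (simpler).

-- ===== PORT A =====
-- the 'for i in range(1, 10)' loop with its early return
def classifyLoopA (f : String) : List Int → String
  | [] => "unknown"
  | i :: rest =>
    if PySem.Str.startswith f (PySem.Int.toStr i ++ "_")
        || PySem.Str.startswith f (PySem.Int.toStr i ++ "_neg") then
      "sample_" ++ PySem.Int.toStr i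
    else classifyLoopA f rest

def classify_from_filename_py (filename : String) : String :=
  let f := PySem.Str.lower filename
  if PySem.Str.isIn "blank" f then "blank"
  else classifyLoopA f (PySem.List.pyRange 1 10 1)

-- ===== PORT B =====
-- 'len(f) >= 2 and "1" <= f[0] <= "9" and f[1] == "_"' rendered as a match on the first two characters
def classify_from_filename_py_alt (filename : String) : String :=
  let f := PySem.Str.lower filename
  if PySem.Str.isIn "blank" f then "blank"
  else
    match f.toList with
    | c0 :: c1 :: _ =>
        if '1' ≤ c0 ∧ c0 ≤ '9' ∧ c1 = '_' then "sample_" ++ String.ofList [c0] else "unknown"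
    | _ => "unknown"

-- ===== PRECONDITION & SPEC =====
def Spec_classify_from_filename_py (filename : String) (out : String) : Prop := out = classify_from_filename_py_alt filename
instance (filename : String) (out : String) : Decidable (Spec_classify_from_filename_py filename out) := by unfold Spec_classify_from_filename_py; infer_instance

-- ===== CLAIM (what is proved, stated in full; the proofs are below) =====
def Claim_equal_classify_from_filename_py : Prop := ∀ (filename : String), Dom_classify_from_filename_py filename → Spec_classify_from_filename_py filename (classify_from_filename_py filename)

-- ===== LEMMAS AND PROOFS =====

theorem pyRange_1_10 : PySem.List.pyRange 1 10 1 = [1,2,3,4,5,6,7,8,9] := by decide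

theorem char_eq_of_toNat (a b : Char) (h : a.val.toNat = b.val.toNat) : a = b := by
  apply Char.ext; apply UInt32.toNat_inj.mp; exact h

theorem char_digit_cases (c : Char) (h1 : '1' ≤ c) (h9 : c ≤ '9') :
    c = '1' ∨ c = '2' ∨ c = '3' ∨ c = '4' ∨ c = '5' ∨ c = '6' ∨ c = '7' ∨ c = '8' ∨ c = '9' := by
  rw [Char.le_def, UInt32.le_iff_toNat_le] at h1 h9
  rw [show ('1').val.toNat = 49 from by decide] at h1
  rw [show ('9').val.toNat = 57 from by decide] at h9
  have h : c.val.toNat = 49 ∨ c.val.toNat = 50 ∨ c.val.toNat = 51 ∨ c.val.toNat = 52 ∨ c.val.toNat = 53 ∨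
      c.val.toNat = 54 ∨ c.val.toNat = 55 ∨ c.val.toNat = 56 ∨ c.val.toNat = 57 := by omega
  rcases h with h | h | h | h | h | h | h | h | h <;>
    [exact Or.inl (char_eq_of_toNat _ _ (by rw [h]; decide));
     exact Or.inr (Or.inl (char_eq_of_toNat _ _ (by rw [h]; decide)));
     exact Or.inr (Or.inr (Or.inl (char_eq_of_toNat _ _ (by rw [h]; decide))));
     exact Or.inr (Or.inr (Or.inr (Or.inl (char_eq_of_toNat _ _ (by rw [h]; decide)))));
     exact Or.inr (Or.inr (Or.inr (Or.inr (Or.inl (char_eq_of_toNat _ _ (by rw [h]; decide))))));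
     exact Or.inr (Or.inr (Or.inr (Or.inr (Or.inr (Or.inl (char_eq_of_toNat _ _ (by rw [h]; decide)))))));
     exact Or.inr (Or.inr (Or.inr (Or.inr (Or.inr (Or.inr (Or.inl (char_eq_of_toNat _ _ (by rw [h]; decide))))))));
     exact Or.inr (Or.inr (Or.inr (Or.inr (Or.inr (Or.inr (Or.inr (Or.inl (char_eq_of_toNat _ _ (by rw [h]; decide)))))))));
     exact Or.inr (Or.inr (Or.inr (Or.inr (Or.inr (Or.inr (Or.inr (Or.inr (char_eq_of_toNat _ _ (by rw [h]; decide)))))))))]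

theorem char_not_digit (c : Char) (h : ¬('1' ≤ c ∧ c ≤ '9')) :
    c ≠ '1' ∧ c ≠ '2' ∧ c ≠ '3' ∧ c ≠ '4' ∧ c ≠ '5' ∧ c ≠ '6' ∧ c ≠ '7' ∧ c ≠ '8' ∧ c ≠ '9' := by
  refine ⟨?_, ?_, ?_, ?_, ?_, ?_, ?_, ?_, ?_⟩ <;>
    · rintro rfl; exact h (by constructor <;> decide)

theorem loopA_eq (f : String) :
    classifyLoopA f [1,2,3,4,5,6,7,8,9] =
      (match f.toList with
        | c0 :: c1 :: _ =>
            if '1' ≤ c0 ∧ c0 ≤ '9' ∧ c1 = '_' then "sample_" ++ String.ofList [c0] else "unknown"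
        | _ => "unknown") := by
  rcases hl : f.toList with _ | ⟨c0, _ | ⟨c1, rest⟩⟩ <;>
    simp only [classifyLoopA, PySem.Str.startswith_eq, hl, PySem.Int.toStr, String.toList_append,
      String.toList_ofList,
      show ("_" : String).toList = ['_'] from by decide,
      show ("_neg" : String).toList = ['_','n','e','g'] from by decide,
      show PySem.Int.toChars 1 = ['1'] from by decide, show PySem.Int.toChars 2 = ['2'] from by decide,
      show PySem.Int.toChars 3 = ['3'] from by decide, show PySem.Int.toChars 4 = ['4'] from by decide,
      show PySem.Int.toChars 5 = ['5'] from by decide, show PySem.Int.toChars 6 = ['6'] from by decide,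
      show PySem.Int.toChars 7 = ['7'] from by decide, show PySem.Int.toChars 8 = ['8'] from by decide,
      show PySem.Int.toChars 9 = ['9'] from by decide,
      List.cons_append, List.nil_append]
  · simp [PySem.Chars.startswith_iff]
  · simp [PySem.Chars.startswith_iff, List.cons_prefix_cons]
  · by_cases h1 : c1 = '_'
    · subst h1
      by_cases hd : '1' ≤ c0 ∧ c0 ≤ '9'
      · rcases char_digit_cases c0 hd.1 hd.2 with rfl | rfl | rfl | rfl | rfl | rfl | rfl | rfl | rfl <;>
          simp [PySem.Chars.startswith_iff, List.cons_prefix_cons]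
      · obtain ⟨n1, n2, n3, n4, n5, n6, n7, n8, n9⟩ := char_not_digit c0 hd
        simp [PySem.Chars.startswith_iff, List.cons_prefix_cons, hd, Ne.symm n1, Ne.symm n2, Ne.symm n3, Ne.symm n4,
          Ne.symm n5, Ne.symm n6, Ne.symm n7, Ne.symm n8, Ne.symm n9]
    · simp [PySem.Chars.startswith_iff, List.cons_prefix_cons, h1, Ne.symm h1]

-- ===== VERDICT (by name: the statement is the Claim_ definition above) =====
theorem classify_from_filename_py_spec : Claim_equal_classify_from_filename_py := by
  intro filename _
  unfold Spec_classify_from_filename_py classify_from_filename_py classify_from_filename_py_alt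
  by_cases hb : PySem.Str.isIn "blank" (PySem.Str.lower filename) = true <;>
    simp [hb, pyRange_1_10, loopA_eq]
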